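-- pv_equiv track=rewrite | github.com/JaberHaisan/project-euler-solutions | 98-Anagramic squares/98-Anagramic squares.py | digit_squares
-- ===== SOURCE A (Python) =====
-- def digit_squares(n):
-- 	"""Generates all squares with n digits and returns a list of strings."""
-- 	squares = []
-- 	b = 1
-- 	while True:
-- 		square = pow(b, 2)
-- 		square_str = str(square)
-- 		if len(square_str) == n:
-- 			squares.append(square_str)
-- 		if len(square_str) > n:
-- 			break
-- 		b += 1
-- 	return squares
-- ===== SOURCE B (Python) =====
-- def _isqrt(m):
--     """Floor square root by Newton/Heron iteration (no imports needed)."""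
--     if m <= 1:
--         return m
--     x = 1 << ((m.bit_length() - 1) // 2 + 1)
--     while True:
--         y = (x + m // x) // 2
--         if y < x:
--             x = y
--         else:
--             return x
--
--
-- def digit_squares(n):
--     """Generates all squares with n digits and returns a list of strings."""
--     if n <= 0:
--         return []
--     lo = _isqrt(10 ** (n - 1) - 1) + 1
--     hi = _isqrt(10 ** n - 1)
--     return [str(b * b) for b in range(lo, hi + 1)]
-- ===== Notes on version B (the rewrite author's own statement) =====
-- stated objective: faster
-- what changed: B replaces A's unbounded square-and-test loop (grow b from 1, convert every b*b to a string, compare its length to n, break on overflow) by closed-form numeric bounds: a Newton-iteration integer square root yields lo and hi, and the result is a direct map over range(lo, hi+1) with no length test or break.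
import Mathlib
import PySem

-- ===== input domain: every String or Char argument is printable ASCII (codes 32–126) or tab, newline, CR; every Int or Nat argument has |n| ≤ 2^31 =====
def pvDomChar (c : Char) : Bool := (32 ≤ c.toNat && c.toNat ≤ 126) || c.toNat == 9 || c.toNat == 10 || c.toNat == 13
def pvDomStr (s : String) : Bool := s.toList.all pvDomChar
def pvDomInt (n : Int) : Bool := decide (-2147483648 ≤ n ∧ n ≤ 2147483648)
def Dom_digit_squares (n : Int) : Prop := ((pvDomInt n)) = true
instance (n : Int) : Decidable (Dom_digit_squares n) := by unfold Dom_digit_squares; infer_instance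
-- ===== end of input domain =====

-- B computes the n-digit window [lo, hi] closed-form via a Newton integer sqrt instead of
-- A's square-and-test-string-length loop from b = 1, skipping every b below the window
-- and all of A's string conversions for them (return value is unchanged).

-- ===== PORT A =====
-- A's 'while True' loop; the fuel argument is a totality guard only (the loop breaks at
-- b = hi+1 ≤ 10^n + 1, so the fuel 10^n + 2 supplied below is never exhausted).
def digitSquaresLoop (n : Int) : Nat → Int → List String → List String
  | 0, _, acc => acc
  | fuel + 1, b, acc =>
      let square := b * b
      let square_str := PySem.Int.toStr square
      let acc' := if PySem.Str.len square_str = n then acc ++ [square_str] else acc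
      if PySem.Str.len square_str > n then acc' else digitSquaresLoop n fuel (b + 1) acc'

def digit_squares (n : Int) : List String :=
  digitSquaresLoop n (10 ^ n.toNat + 2) 1 []

-- ===== PORT B =====
-- B's Heron/Newton loop: y = (x + m // x) // 2; descend while y < x.
def heron (m x : Nat) : Nat :=
  let y := (x + m / x) / 2
  if _h : y < x then heron m y else x
termination_by x

-- B's _isqrt: initial guess 1 << ((m.bit_length() - 1) // 2 + 1).
def isqrtB (m : Nat) : Nat :=
  if m ≤ 1 then m
  else heron m (1 <<< ((PySem.Int.bitLength (m : Int) - 1) / 2 + 1))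

def digit_squares_alt (n : Int) : List String :=
  if n ≤ 0 then []
  else
    let lo : Int := (isqrtB (10 ^ (n - 1).toNat - 1) : Int) + 1
    let hi : Int := (isqrtB (10 ^ n.toNat - 1) : Int)
    (PySem.List.pyRange lo (hi + 1) 1).map (fun b => PySem.Int.toStr (b * b))

-- ===== PRECONDITION & SPEC =====
def Spec_digit_squares (n : Int) (out : List String) : Prop := out = digit_squares_alt n
instance (n : Int) (out : List String) : Decidable (Spec_digit_squares n out) := by unfold Spec_digit_squares; infer_instance

-- ===== CLAIM (what is proved, stated in full; the proofs are below) =====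
def Claim_equal_digit_squares : Prop := ∀ (n : Int), Dom_digit_squares n → Spec_digit_squares n (digit_squares n)

-- ===== LEMMAS AND PROOFS =====

-- Heron step keeps the iterate at or above the square root (integer AM–GM).
lemma sqrt_le_heron_step (m x : Nat) (hx : 0 < x) : Nat.sqrt m ≤ (x + m / x) / 2 := by
  set s := Nat.sqrt m with hs
  have hsq : s * s ≤ m := Nat.sqrt_le m
  have hdiv : m < x * (m / x) + x := by
    have h1 := Nat.div_add_mod m x
    have h2 := Nat.mod_lt m hx
    linarith
  have h2 : 2 * s ≤ x + m / x := by
    by_contra h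
    push_neg at h
    have hq : m / x ≤ 2 * s - 1 - x := by omega
    zify at hsq hdiv hq ⊢
    nlinarith [sq_nonneg ((x : Int) - s)]
  omega

lemma heron_eq (m : Nat) : ∀ x, Nat.sqrt m ≤ x → heron m x = Nat.sqrt m := by
  intro x
  induction x using Nat.strong_induction_on with
  | _ x ih =>
    intro hsx
    rw [heron]
    by_cases hx0 : x = 0
    · subst hx0
      simp only [Nat.zero_div, Nat.add_zero, Nat.div_zero]
      norm_num
      omega
    · have hx : 0 < x := Nat.pos_of_ne_zero hx0
      set y := (x + m / x) / 2 with hy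
      have hys : Nat.sqrt m ≤ y := sqrt_le_heron_step m x hx
      by_cases h : y < x
      · simp only [h, dite_true]
        exact ih y h hys
      · simp only [h, dite_false]
        -- y ≥ x: show x = sqrt m.  If sqrt m < x then m < x*x, so m/x < x, so y < x.
        by_contra hne
        have hlt : Nat.sqrt m < x := lt_of_le_of_ne hsx (fun he => hne he.symm)
        have hm : m < x * x := Nat.sqrt_lt.mp hlt
        have : m / x < x := Nat.div_lt_iff_lt_mul hx |>.mpr hm
        omega

lemma isqrtB_eq (m : Nat) : isqrtB m = Nat.sqrt m := by
  rw [isqrtB]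
  by_cases hm : m ≤ 1
  · interval_cases m <;> simp
  · simp only [hm, if_false]
    apply heron_eq
    push_neg at hm
    set L := PySem.Int.bitLength (m : Int) with hL
    have hmL : m < 2 ^ L := by
      have := PySem.Int.lt_two_pow_bitLength (m : Int)
      simpa using this
    rw [Nat.one_shiftLeft]
    have hexp : L ≤ 2 * ((L - 1) / 2 + 1) := by omega
    have : m < 2 ^ ((L - 1) / 2 + 1) * 2 ^ ((L - 1) / 2 + 1) := by
      calc m < 2 ^ L := hmL
        _ ≤ 2 ^ (2 * ((L - 1) / 2 + 1)) := Nat.pow_le_pow_right (by norm_num) hexp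
        _ = 2 ^ ((L - 1) / 2 + 1) * 2 ^ ((L - 1) / 2 + 1) := by rw [two_mul, pow_add]
    exact le_of_lt (Nat.sqrt_lt.mpr this)

-- Length of the decimal representation: (toDigitsCore 10 f n l).length = log₁₀ n + 1 + |l|.
lemma toDigitsCore_len (f : Nat) : ∀ (n : Nat) (l : List Char), 0 < f → n < 10 ^ f →
    (Nat.toDigitsCore 10 f n l).length = Nat.log 10 n + 1 + l.length := by
  induction f with
  | zero => intro n l hf h; omega
  | succ f ih =>
    intro n l _ h
    rw [Nat.toDigitsCore]
    by_cases h10 : n / 10 = 0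
    · have hn : n < 10 := by omega
      have hlog0 : Nat.log 10 n = 0 := Nat.log_eq_zero_iff.mpr (Or.inl hn)
      simp [h10, hlog0]
      omega
    · simp only [h10, if_false]
      have hn10 : 10 ≤ n := by
        by_contra hc
        exact h10 (Nat.div_eq_of_lt (by omega))
      have hf1 : 1 ≤ f := by
        by_contra hc
        have hf0 : f = 0 := by omega
        rw [hf0] at h
        omega
      have hdivlt : n / 10 < 10 ^ f := by
        have h' : n < 10 ^ f * 10 := by rw [← pow_succ]; exact h
        exact Nat.div_lt_of_lt_mul (by linarith)
      rw [ih (n / 10) _ (by omega) hdivlt]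
      have hlog : Nat.log 10 n = Nat.log 10 (n / 10) + 1 := by
        rw [Nat.log_div_base]
        have : 1 ≤ Nat.log 10 n := Nat.le_log_of_pow_le (by norm_num) (by simpa using hn10)
        omega
      simp only [List.length_cons, hlog]
      omega

lemma len_toChars (m : Nat) : (PySem.Int.toChars (m : Int)).length = Nat.log 10 m + 1 := by
  rw [PySem.Int.toChars]
  have h1 : ¬ ((m : Int) < 0) := by omega
  simp only [h1, if_false, Int.toNat_natCast]
  rw [Nat.toDigits]
  have hlt : m < 10 ^ (m + 1) :=
    lt_of_lt_of_le (Nat.lt_pow_self (by norm_num)) (Nat.pow_le_pow_right (by norm_num) (by omega))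
  have := toDigitsCore_len (m + 1) m [] (by omega) hlt
  simpa using this

lemma strlen_toStr (m : Nat) : PySem.Str.len (PySem.Int.toStr (m : Int)) = (Nat.log 10 m + 1 : Nat) := by
  rw [PySem.Str.len_eq, PySem.Int.toList_toStr, len_toChars]

-- Digit-count ↔ magnitude brackets, with the sqrt-derived bounds.
lemma digit_window (N b : Nat) (hN : 1 ≤ N) (hb : 1 ≤ b) :
    (Nat.log 10 (b * b) + 1 = N ↔ Nat.sqrt (10 ^ (N - 1) - 1) + 1 ≤ b ∧ b ≤ Nat.sqrt (10 ^ N - 1)) ∧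
    (N < Nat.log 10 (b * b) + 1 ↔ Nat.sqrt (10 ^ N - 1) < b) := by
  have hbb : b * b ≠ 0 := by positivity
  have h1 : N - 1 ≤ Nat.log 10 (b * b) ↔ 10 ^ (N - 1) ≤ b * b :=
    Nat.le_log_iff_pow_le (by norm_num) hbb
  have h2 : Nat.log 10 (b * b) < N ↔ b * b < 10 ^ N :=
    Nat.log_lt_iff_lt_pow (by norm_num) hbb
  have hP : 1 ≤ 10 ^ (N - 1) := Nat.one_le_pow _ _ (by norm_num)
  have hQ : 1 ≤ 10 ^ N := Nat.one_le_pow _ _ (by norm_num)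
  have hlo : Nat.sqrt (10 ^ (N - 1) - 1) + 1 ≤ b ↔ 10 ^ (N - 1) ≤ b * b := by
    rw [Nat.add_one_le_iff, Nat.sqrt_lt]
    omega
  have hhi : b ≤ Nat.sqrt (10 ^ N - 1) ↔ b * b < 10 ^ N := by
    rw [Nat.le_sqrt]
    omega
  constructor
  · omega
  · omega

-- The loop of A, run from any b in [1, hi+1] with enough fuel, appends exactly the
-- n-digit squares of [max b lo, hi].
lemma loop_eq (N : Nat) (hN : 1 ≤ N) :
    ∀ (fuel b : Nat) (acc : List String), 1 ≤ b →
      b ≤ Nat.sqrt (10 ^ N - 1) + 1 → Nat.sqrt (10 ^ N - 1) + 2 - b ≤ fuel →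
    digitSquaresLoop (N : Int) fuel (b : Int) acc
      = acc ++ (PySem.List.pyRange (max b (Nat.sqrt (10 ^ (N - 1) - 1) + 1) : Nat)
          ((Nat.sqrt (10 ^ N - 1) : Int) + 1) 1).map (fun x => PySem.Int.toStr (x * x)) := by
  set lo := Nat.sqrt (10 ^ (N - 1) - 1) + 1 with hlo
  set hi := Nat.sqrt (10 ^ N - 1) with hhi
  intro fuel
  induction fuel with
  | zero => intro b acc _ hb2 hf; omega
  | succ fuel ih =>
    intro b acc hb1 hb2 hf
    have hcast : (b : Int) * (b : Int) = ((b * b : Nat) : Int) := by push_cast; ring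
    have hwin := digit_window N b hN hb1
    rw [digitSquaresLoop]
    simp only [hcast, strlen_toStr]
    by_cases hbig : hi < b
    · -- b = hi + 1 : length > n, break; window is empty
      have hgt : ((Nat.log 10 (b * b) + 1 : Nat) : Int) > (N : Int) := by
        have := hwin.2.mpr hbig
        exact_mod_cast this
      have hne : ¬ (((Nat.log 10 (b * b) + 1 : Nat) : Int) = (N : Int)) := by omega
      simp only [hne, if_false, gt_iff_lt, show (N : Int) < ((Nat.log 10 (b * b) + 1 : Nat) : Int) from hgt, if_true]
      have hm : hi + 1 ≤ max b lo := le_max_of_le_left (by omega)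
      rw [PySem.List.pyRange_one_eq_nil (by exact_mod_cast hm)]
      simp
    · push_neg at hbig
      have hle : ¬ ((N : Int) < ((Nat.log 10 (b * b) + 1 : Nat) : Int)) := by
        have h' : ¬ (N < Nat.log 10 (b * b) + 1) := by rw [hwin.2]; omega
        exact_mod_cast h'
      simp only [gt_iff_lt, hle, if_false]
      by_cases hin : lo ≤ b
      · -- in the window: append and continue
        have heq : ((Nat.log 10 (b * b) + 1 : Nat) : Int) = (N : Int) := by
          have := hwin.1.mpr ⟨hin, hbig⟩
          exact_mod_cast this
        simp only [heq, if_true]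
        have hrec := ih (b + 1) (acc ++ [PySem.Int.toStr ((b * b : Nat) : Int)])
          (by omega) (by omega) (by omega)
        have hmaxn : max b lo = b := max_eq_left hin
        have hmaxn2 : max (b + 1) lo = b + 1 := max_eq_left (by omega)
        have hcast2 : ((b + 1 : Nat) : Int) = (b : Int) + 1 := by push_cast; ring
        rw [hmaxn2, hcast2] at hrec
        rw [hmaxn, hrec]
        rw [PySem.List.pyRange_one_cons (show (b : Int) < (hi : Int) + 1 by omega)]
        rw [← hcast]
        simp
      · -- below the window: length < n, nothing appended
        push_neg at hin
        have hne : ¬ (((Nat.log 10 (b * b) + 1 : Nat) : Int) = (N : Int)) := by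
          intro hc
          have hc' : Nat.log 10 (b * b) + 1 = N := by exact_mod_cast hc
          have := hwin.1.mp hc'
          omega
        simp only [hne, if_false]
        have hrec := ih (b + 1) acc (by omega) (by omega) (by omega)
        have hmaxn : max b lo = lo := max_eq_right (by omega)
        have hmaxn2 : max (b + 1) lo = lo := max_eq_right (by omega)
        have hcast2 : ((b + 1 : Nat) : Int) = (b : Int) + 1 := by push_cast; ring
        rw [hmaxn2, hcast2] at hrec
        rw [hmaxn, hrec]

-- ===== VERDICT (by name: the statement is the Claim_ definition above) =====
theorem digit_squares_spec : Claim_equal_digit_squares := by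
  intro n _
  unfold Spec_digit_squares digit_squares digit_squares_alt
  by_cases hn : n ≤ 0
  · -- the first square "1" already has more digits than n: break at once with []
    rw [if_pos hn]
    have ht : n.toNat = 0 := by omega
    rw [ht]
    norm_num [digitSquaresLoop]
    have l1 : (((PySem.Int.toChars 1).length : Nat) : Int) = 1 := by decide
    rw [l1, if_pos (show n < (1 : Int) by omega), if_neg (show ¬ ((1 : Int) = n) by omega)]
  · push_neg at hn
    obtain ⟨N, rfl⟩ : ∃ N : Nat, n = (N : Int) := ⟨n.toNat, by omega⟩
    have hN : 1 ≤ N := by exact_mod_cast hn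
    rw [if_neg (show ¬ ((N : Int) ≤ 0) by omega)]
    simp only [Int.toNat_natCast]
    have hsub : ((N : Int) - 1).toNat = N - 1 := by omega
    rw [hsub, isqrtB_eq, isqrtB_eq]
    have hfuel : Nat.sqrt (10 ^ N - 1) + 2 - 1 ≤ 10 ^ N + 2 := by
      have h := Nat.sqrt_le_self (10 ^ N - 1)
      have h10 : 1 ≤ 10 ^ N := Nat.one_le_pow _ _ (by norm_num)
      omega
    have hmain := loop_eq N hN (10 ^ N + 2) 1 [] (le_refl 1) (by omega) hfuel
    simp only [Nat.cast_one] at hmain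
    rw [hmain]
    have hmax : max 1 (Nat.sqrt (10 ^ (N - 1) - 1) + 1) = Nat.sqrt (10 ^ (N - 1) - 1) + 1 := by
      omega
    rw [hmax]
    push_cast
    simp
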